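-- pv_equiv track=rewrite | github.com/nrbeca/reportes. | austeridad_processor.py | obtener_urs_disponibles_cp
-- ===== SOURCE A (Python) =====
-- def obtener_urs_disponibles_cp(datos_cp):
--     """
--     Obtiene la lista de URs disponibles en Cuenta Pública.
--
--     La concatenación es PartidaUR, así que extraemos los últimos 3 caracteres
--     para URs de 3 dígitos o lo que reste después de la partida de 5 dígitos.
--
--     Returns:
--         list: Lista de URs únicas ordenadas
--     """
--     urs = set()
--     for concat in datos_cp.keys():
--         # La partida es de 5 dígitos, el resto es la UR
--         if len(concat) > 5:
--             ur = concat[5:]  # Todo después de los 5 dígitos de partida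
--             urs.add(ur)
--
--     # Separar numéricas de alfanuméricas
--     urs_num = sorted([ur for ur in urs if ur.isdigit()], key=lambda x: int(x))
--     urs_alpha = sorted([ur for ur in urs if not ur.isdigit()])
--
--     return urs_num + urs_alpha
-- ===== SOURCE B (Python) =====
-- def obtener_urs_disponibles_cp(datos_cp):
--     # B: online insertion sort in a single pass over the keys -- the result
--     # list is kept sorted (numeric URs by int value first, then the rest
--     # lexicographically) at all times; no set and no library sort.
--     def key(u):
--         return (0, int(u)) if u.isdigit() else (1, u)
--     result = []
--     for concat in datos_cp:
--         if len(concat) > 5: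
--             ur = concat[5:]
--             if ur in result:
--                 continue
--             i = 0
--             while i < len(result) and key(result[i]) < key(ur):
--                 i += 1
--             result.insert(i, ur)
--     return result
-- ===== Notes on version B (the rewrite author's own statement) =====
-- stated objective: alternative
-- what changed: B replaces A's set-collection plus two offline library sorts with a single left-to-right pass that keeps the result list sorted at all times by ordered insertion (online insertion sort), deduplicating via a membership test on the result itself.
-- outside the precondition, e.g. on obtener_urs_disponibles_cp({'123457': 0, '12345007': 1}): A returns ['7', '007'], B returns ['007', '7']
import Mathlib
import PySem

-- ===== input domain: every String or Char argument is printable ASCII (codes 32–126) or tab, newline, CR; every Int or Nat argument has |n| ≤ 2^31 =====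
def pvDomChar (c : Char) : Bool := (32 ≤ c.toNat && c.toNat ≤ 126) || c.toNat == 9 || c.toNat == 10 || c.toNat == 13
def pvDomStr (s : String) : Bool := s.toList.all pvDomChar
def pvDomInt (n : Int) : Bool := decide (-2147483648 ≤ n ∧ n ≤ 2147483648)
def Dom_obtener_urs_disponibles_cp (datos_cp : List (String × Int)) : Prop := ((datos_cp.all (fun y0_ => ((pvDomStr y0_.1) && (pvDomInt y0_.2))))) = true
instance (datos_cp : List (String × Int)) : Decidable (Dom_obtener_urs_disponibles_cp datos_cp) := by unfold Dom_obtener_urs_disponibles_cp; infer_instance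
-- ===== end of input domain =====

-- B replaces A's set-collection plus two offline sorts by a single pass that keeps the result
-- sorted at all times via ordered insertion (objective: alternative algorithm).

-- ===== PORT A =====
-- concat[5:]
def pvSuffix (s : String) : String := PySem.Str.slice s (some 5) none

-- int(x); exact in this file's uses: it is only applied to strings with x.isdigit() true, where int(x) succeeds
def pvNumKey (x : String) : Int := (PySem.Int.ofStr? x).getD 0

def obtener_urs_disponibles_cp (datos_cp : List (String × Int)) : List String :=
  let urs : PySem.Set String := datos_cp.foldl
    (fun s kv => if 5 < PySem.Str.len kv.1 then PySem.Set.add s (pvSuffix kv.1) else s)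
    PySem.Set.empty
  let urs_num := PySem.List.sorted (urs.filter (fun ur => PySem.Str.strIsdigit ur)) (fun x => pvNumKey x)
  let urs_alpha := PySem.List.sorted (urs.filter (fun ur => !PySem.Str.strIsdigit ur)) (fun x => x)
  urs_num ++ urs_alpha

-- ===== PORT B =====
-- Python's comparison key(a) < key(b) of the two tuples, written out case by case
-- (the Lex-order instance on Nat × (Int ⊕ String) is not executable, so the port compares directly)
def pvKeyLt (a b : String) : Bool :=
  match PySem.Str.strIsdigit a, PySem.Str.strIsdigit b with
  | true, true => decide (pvNumKey a < pvNumKey b)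
  | true, false => true
  | false, true => false
  | false, false => decide (a < b)

-- Source B's 'while i < len(result) and key(result[i]) < key(ur): i += 1; result.insert(i, ur)':
-- walk past the elements with smaller key, put ur at the first position whose key is not smaller
def pvInsertAt (res : List String) (ur : String) : List String :=
  match res with
  | [] => [ur]
  | x :: xs => if pvKeyLt x ur then x :: pvInsertAt xs ur else ur :: x :: xs

def obtener_urs_disponibles_cp_alt (datos_cp : List (String × Int)) : List String :=
  datos_cp.foldl
    (fun res kv =>
      if 5 < PySem.Str.len kv.1 then
        let ur := pvSuffix kv.1
        if ur ∈ res then res else pvInsertAt res ur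
      else res)
    []

-- ===== PRECONDITION & SPEC =====
-- Pre_ excludes inputs where two DIFFERENT digit suffixes have the same integer value (leading zeros):
-- there the relative order of the tied pair in A's result follows CPython's hash-dependent set iteration
-- order, which is not modelled; both programs still return (and may legitimately disagree) on such inputs.
def Pre_obtener_urs_disponibles_cp (datos_cp : List (String × Int)) : Prop :=
  ∀ kv ∈ datos_cp, ∀ kw ∈ datos_cp,
    5 < PySem.Str.len kv.1 → 5 < PySem.Str.len kw.1 →
    PySem.Str.strIsdigit (pvSuffix kv.1) = true → PySem.Str.strIsdigit (pvSuffix kw.1) = true →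
    pvNumKey (pvSuffix kv.1) = pvNumKey (pvSuffix kw.1) → pvSuffix kv.1 = pvSuffix kw.1
instance (datos_cp : List (String × Int)) : Decidable (Pre_obtener_urs_disponibles_cp datos_cp) := by
  unfold Pre_obtener_urs_disponibles_cp; infer_instance

def pvWitness_obtener_urs_disponibles_cp : (List (String × Int)) := [("00000A1", 3), ("12345123", 0), ("0001", 7)]

def Spec_obtener_urs_disponibles_cp (datos_cp : List (String × Int)) (out : List String) : Prop := out = obtener_urs_disponibles_cp_alt datos_cp
instance (datos_cp : List (String × Int)) (out : List String) : Decidable (Spec_obtener_urs_disponibles_cp datos_cp out) := by unfold Spec_obtener_urs_disponibles_cp; infer_instance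

-- ===== CLAIM (what is proved, stated in full; the proofs are below) =====
def Claim_equal_obtener_urs_disponibles_cp : Prop := ∀ (datos_cp : List (String × Int)), Dom_obtener_urs_disponibles_cp datos_cp → Pre_obtener_urs_disponibles_cp datos_cp → Spec_obtener_urs_disponibles_cp datos_cp (obtener_urs_disponibles_cp datos_cp)

-- ===== LEMMAS AND PROOFS =====

-- the composite key Source B's comparison realises, as a genuine lexicographic order (proof device)
def pvKeyB (u : String) : Lex (Nat × Lex (Int ⊕ String)) :=
  if PySem.Str.strIsdigit u then toLex (0, toLex (Sum.inl (pvNumKey u))) else toLex (1, toLex (Sum.inr u))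

theorem pvKeyLt_iff (a b : String) : pvKeyLt a b = true ↔ pvKeyB a < pvKeyB b := by
  unfold pvKeyLt pvKeyB
  cases ha : PySem.Str.strIsdigit a <;> cases hb : PySem.Str.strIsdigit b <;>
    simp [Prod.Lex.toLex_lt_toLex]

-- the strict order B's insertion maintains
def pvR (a b : String) : Prop := pvKeyB a < pvKeyB b

-- the suffix stream both programs process
def pvSufs (l : List (String × Int)) : List String :=
  (l.filter (fun kv => decide (5 < PySem.Str.len kv.1))).map (fun kv => pvSuffix kv.1)

theorem pvSufs_cons (kv : String × Int) (l : List (String × Int)) :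
    pvSufs (kv :: l)
    = if 5 < PySem.Str.len kv.1 then pvSuffix kv.1 :: pvSufs l else pvSufs l := by
  unfold pvSufs
  rw [List.filter_cons]
  by_cases h : 5 < PySem.Str.len kv.1
  · rw [decide_eq_true h, if_pos rfl, if_pos h, List.map_cons]
  · rw [decide_eq_false h, if_neg (by simp), if_neg h]

theorem pvMem_insertAt (res : List String) (ur a : String) :
    a ∈ pvInsertAt res ur ↔ a ∈ res ∨ a = ur := by
  induction res with
  | nil => simp [pvInsertAt]
  | cons x xs ih =>
    unfold pvInsertAt
    by_cases h : pvKeyB x < pvKeyB ur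
    · rw [if_pos ((pvKeyLt_iff x ur).mpr h)]
      simp [ih]; tauto
    · rw [if_neg (fun hh => h ((pvKeyLt_iff x ur).mp hh))]
      simp; tauto

theorem pvNodup_insertAt (res : List String) (ur : String) (hnot : ur ∉ res) (hnd : res.Nodup) :
    (pvInsertAt res ur).Nodup := by
  induction res with
  | nil => simp [pvInsertAt]
  | cons x xs ih =>
    unfold pvInsertAt
    rw [List.nodup_cons] at hnd
    by_cases h : pvKeyB x < pvKeyB ur
    · rw [if_pos ((pvKeyLt_iff x ur).mpr h), List.nodup_cons, pvMem_insertAt]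
      refine ⟨?_, ih (fun hx => hnot (List.mem_cons_of_mem _ hx)) hnd.2⟩
      rintro (hx | rfl)
      · exact hnd.1 hx
      · exact hnot (List.mem_cons_self)
    · rw [if_neg (fun hh => h ((pvKeyLt_iff x ur).mp hh)), List.nodup_cons]
      exact ⟨hnot, List.nodup_cons.mpr hnd⟩

theorem pvPairwise_insertAt (res : List String) (ur : String)
    (hne : ∀ x ∈ res, pvKeyB x ≠ pvKeyB ur) (hs : res.Pairwise pvR) :
    (pvInsertAt res ur).Pairwise pvR := by
  induction res with
  | nil => simp [pvInsertAt]
  | cons x xs ih =>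
    rw [List.pairwise_cons] at hs
    unfold pvInsertAt
    by_cases h : pvKeyB x < pvKeyB ur
    · rw [if_pos ((pvKeyLt_iff x ur).mpr h), List.pairwise_cons]
      refine ⟨?_, ih (fun y hy => hne y (List.mem_cons_of_mem _ hy)) hs.2⟩
      intro b hb
      rcases (pvMem_insertAt xs ur b).mp hb with hb | rfl
      · exact hs.1 b hb
      · exact h
    · rw [if_neg (fun hh => h ((pvKeyLt_iff x ur).mp hh)), List.pairwise_cons]
      have hx : pvKeyB ur < pvKeyB x :=
        lt_of_le_of_ne (not_lt.mp h) (fun he => hne x List.mem_cons_self he.symm)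
      refine ⟨?_, List.pairwise_cons.mpr hs⟩
      intro b hb
      rcases List.mem_cons.mp hb with rfl | hb
      · exact hx
      · exact lt_trans hx (hs.1 b hb)

-- the whole fold: membership, nodup and sortedness of B's accumulator
theorem pvFold_spec (l : List (String × Int)) (res : List String)
    (hinj : ∀ u v : String, (u ∈ res ∨ u ∈ pvSufs l) → (v ∈ res ∨ v ∈ pvSufs l) →
      pvKeyB u = pvKeyB v → u = v)
    (hnd : res.Nodup) (hs : res.Pairwise pvR) :
    (∀ a, a ∈ l.foldl
        (fun res kv =>
          if 5 < PySem.Str.len kv.1 then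
            let ur := pvSuffix kv.1
            if ur ∈ res then res else pvInsertAt res ur
          else res) res ↔ a ∈ res ∨ a ∈ pvSufs l) ∧
    (l.foldl
        (fun res kv =>
          if 5 < PySem.Str.len kv.1 then
            let ur := pvSuffix kv.1
            if ur ∈ res then res else pvInsertAt res ur
          else res) res).Nodup ∧
    (l.foldl
        (fun res kv =>
          if 5 < PySem.Str.len kv.1 then
            let ur := pvSuffix kv.1
            if ur ∈ res then res else pvInsertAt res ur
          else res) res).Pairwise pvR := by
  induction l generalizing res with
  | nil => exact ⟨by simp [pvSufs], hnd, hs⟩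
  | cons kv l ih =>
    have hsufs := pvSufs_cons kv l
    simp only [List.foldl_cons]
    by_cases h : 5 < PySem.Str.len kv.1
    · rw [if_pos h] at hsufs ⊢
      by_cases hmem : pvSuffix kv.1 ∈ res
      · simp only [hmem, if_pos]
        have := ih res
          (fun u v hu hv => hinj u v
            (by rcases hu with hu | hu; exact Or.inl hu; exact Or.inr (by rw [hsufs]; exact List.mem_cons_of_mem _ hu))
            (by rcases hv with hv | hv; exact Or.inl hv; exact Or.inr (by rw [hsufs]; exact List.mem_cons_of_mem _ hv)))
          hnd hs
        refine ⟨?_, this.2⟩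
        intro a
        rw [this.1 a, hsufs]
        constructor
        · rintro (ha | ha)
          · exact Or.inl ha
          · exact Or.inr (List.mem_cons_of_mem _ ha)
        · rintro (ha | ha)
          · exact Or.inl ha
          · rcases List.mem_cons.mp ha with rfl | ha
            · exact Or.inl hmem
            · exact Or.inr ha
      · simp only [hmem, if_neg, not_false_eq_true]
        have hsub : ∀ u : String, u ∈ pvInsertAt res (pvSuffix kv.1) ∨ u ∈ pvSufs l →
            u ∈ res ∨ u ∈ pvSufs (kv :: l) := by
          intro u hu
          rcases hu with hu | hu
          · rcases (pvMem_insertAt _ _ _).mp hu with hu | rfl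
            · exact Or.inl hu
            · exact Or.inr (by rw [hsufs]; exact List.mem_cons_self)
          · exact Or.inr (by rw [hsufs]; exact List.mem_cons_of_mem _ hu)
        have := ih (pvInsertAt res (pvSuffix kv.1))
          (fun u v hu hv => hinj u v (hsub u hu) (hsub v hv))
          (pvNodup_insertAt res _ hmem hnd)
          (pvPairwise_insertAt res _
            (fun x hx he => hmem (by
              have : x = pvSuffix kv.1 := hinj x (pvSuffix kv.1) (Or.inl hx)
                (Or.inr (by rw [hsufs]; exact List.mem_cons_self)) he
              rwa [this] at hx)) hs)
        refine ⟨?_, this.2⟩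
        intro a
        rw [this.1 a, pvMem_insertAt, hsufs]
        constructor
        · rintro ((ha | rfl) | ha)
          · exact Or.inl ha
          · exact Or.inr List.mem_cons_self
          · exact Or.inr (List.mem_cons_of_mem _ ha)
        · rintro (ha | ha)
          · exact Or.inl (Or.inl ha)
          · rcases List.mem_cons.mp ha with rfl | ha
            · exact Or.inl (Or.inr rfl)
            · exact Or.inr ha
    · rw [if_neg h] at hsufs ⊢
      rw [hsufs] at hinj ⊢
      exact ih res hinj hnd hs

-- A's set-build over any initial set is Set.update with the suffix stream
theorem pvUrs_eq_aux (l : List (String × Int)) (s : PySem.Set String) :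
    l.foldl (fun s kv => if 5 < PySem.Str.len kv.1 then PySem.Set.add s (pvSuffix kv.1) else s) s
    = PySem.Set.update s (pvSufs l) := by
  induction l generalizing s with
  | nil => simp [PySem.Set.update, pvSufs]
  | cons kv l ih =>
    simp only [List.foldl_cons]
    rw [pvSufs_cons]
    by_cases h : 5 < PySem.Str.len kv.1
    · rw [if_pos h, if_pos h, ih]
      rfl
    · rw [if_neg h, if_neg h, ih]

theorem pvUrs_eq (datos_cp : List (String × Int)) :
    datos_cp.foldl
      (fun s kv => if 5 < PySem.Str.len kv.1 then PySem.Set.add s (pvSuffix kv.1) else s)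
      PySem.Set.empty
    = PySem.Set.ofList (pvSufs datos_cp) := by
  rw [← PySem.Set.update_nil_left]
  exact pvUrs_eq_aux datos_cp PySem.Set.empty

-- A's concatenation of the two sorts: same membership as U, nodup, and strictly sorted by pvKeyB
theorem pvA_mem (U : List String) (a : String) :
    a ∈ PySem.List.sorted (U.filter (fun ur => PySem.Str.strIsdigit ur)) (fun x => pvNumKey x)
      ++ PySem.List.sorted (U.filter (fun ur => !PySem.Str.strIsdigit ur)) (fun x => x)
    ↔ a ∈ U := by
  rw [List.mem_append, PySem.List.mem_sorted, PySem.List.mem_sorted, List.mem_filter, List.mem_filter]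
  cases h : PySem.Chars.strIsdigit a.toList <;> simp [h]

theorem pvA_nodup (U : List String) (hnd : U.Nodup) :
    (PySem.List.sorted (U.filter (fun ur => PySem.Str.strIsdigit ur)) (fun x => pvNumKey x)
      ++ PySem.List.sorted (U.filter (fun ur => !PySem.Str.strIsdigit ur)) (fun x => x)).Nodup := by
  have hperm := ((PySem.List.sorted_perm (U.filter (fun ur => PySem.Str.strIsdigit ur)) (fun x => pvNumKey x) false).append
    (PySem.List.sorted_perm (U.filter (fun ur => !PySem.Str.strIsdigit ur)) (fun x : String => x) false)).trans
    (List.filter_append_perm _ U)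
  exact hperm.symm.nodup hnd

theorem pvA_pairwise (U : List String) (hnd : U.Nodup)
    (hinj : ∀ u ∈ U, ∀ v ∈ U, PySem.Str.strIsdigit u = true → PySem.Str.strIsdigit v = true →
      pvNumKey u = pvNumKey v → u = v) :
    (PySem.List.sorted (U.filter (fun ur => PySem.Str.strIsdigit ur)) (fun x => pvNumKey x)
      ++ PySem.List.sorted (U.filter (fun ur => !PySem.Str.strIsdigit ur)) (fun x => x)).Pairwise pvR := by
  rw [List.pairwise_append]
  refine ⟨?_, ?_, ?_⟩
  · have hp := PySem.List.sorted_pairwise (U.filter (fun ur => PySem.Str.strIsdigit ur)) (fun x => pvNumKey x)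
    have hnd2 : (PySem.List.sorted (U.filter (fun ur => PySem.Str.strIsdigit ur)) (fun x => pvNumKey x)).Nodup :=
      (PySem.List.sorted_perm _ _ _).symm.nodup (hnd.filter _)
    refine (hp.and hnd2).imp_of_mem ?_
    intro a b ha hb hab
    have ha' := (PySem.List.mem_sorted _ _ _ _).mp ha
    have hb' := (PySem.List.mem_sorted _ _ _ _).mp hb
    rw [List.mem_filter] at ha' hb'
    have hlt : pvNumKey a < pvNumKey b := by
      rcases lt_or_eq_of_le hab.1 with h | h
      · exact h
      · exact absurd (hinj a ha'.1 b hb'.1 ha'.2 hb'.2 h) hab.2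
    have haD : PySem.Chars.strIsdigit a.toList = true := by simpa using ha'.2
    have hbD : PySem.Chars.strIsdigit b.toList = true := by simpa using hb'.2
    simp [pvR, pvKeyB, haD, hbD, Prod.Lex.toLex_lt_toLex, hlt]
  · have hp := PySem.List.sorted_pairwise (U.filter (fun ur => !PySem.Str.strIsdigit ur)) (fun x : String => x)
    have hnd2 : (PySem.List.sorted (U.filter (fun ur => !PySem.Str.strIsdigit ur)) (fun x : String => x)).Nodup :=
      (PySem.List.sorted_perm _ _ _).symm.nodup (hnd.filter _)
    refine (hp.and hnd2).imp_of_mem ?_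
    intro a b ha hb hab
    have ha' := (PySem.List.mem_sorted _ _ _ _).mp ha
    have hb' := (PySem.List.mem_sorted _ _ _ _).mp hb
    rw [List.mem_filter] at ha' hb'
    have ha2 : PySem.Chars.strIsdigit a.toList = false := by simpa using ha'.2
    have hb2 : PySem.Chars.strIsdigit b.toList = false := by simpa using hb'.2
    have hlt : a < b := lt_of_le_of_ne hab.1 hab.2
    simp [pvR, pvKeyB, ha2, hb2, Prod.Lex.toLex_lt_toLex, String.lt_iff_toList_lt.mp hlt]
  · intro a ha b hb
    have ha' := (PySem.List.mem_sorted _ _ _ _).mp ha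
    have hb' := (PySem.List.mem_sorted _ _ _ _).mp hb
    rw [List.mem_filter] at ha' hb'
    have haD : PySem.Chars.strIsdigit a.toList = true := by simpa using ha'.2
    have hb2 : PySem.Chars.strIsdigit b.toList = false := by simpa using hb'.2
    simp [pvR, pvKeyB, haD, hb2, Prod.Lex.toLex_lt_toLex]

-- keys are injective on the suffix stream, given Pre_
theorem pvKeyB_inj (datos_cp : List (String × Int)) (hpre : Pre_obtener_urs_disponibles_cp datos_cp) :
    ∀ u v : String, u ∈ pvSufs datos_cp → v ∈ pvSufs datos_cp → pvKeyB u = pvKeyB v → u = v := by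
  intro u v hu hv he
  simp only [pvSufs, List.mem_map, List.mem_filter] at hu hv
  obtain ⟨kv, ⟨hkv, hkv5⟩, rfl⟩ := hu
  obtain ⟨kw, ⟨hkw, hkw5⟩, rfl⟩ := hv
  unfold pvKeyB at he
  by_cases hdu : PySem.Str.strIsdigit (pvSuffix kv.1) = true <;>
    by_cases hdv : PySem.Str.strIsdigit (pvSuffix kw.1) = true
  · rw [if_pos hdu, if_pos hdv, toLex_inj] at he
    have he2 := congrArg Prod.snd he
    rw [toLex_inj] at he2
    exact hpre kv hkv kw hkw (by simpa using hkv5) (by simpa using hkw5) hdu hdv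
      (Sum.inl.injEq _ _ ▸ he2)
  · rw [if_pos hdu, if_neg hdv, toLex_inj] at he
    exact absurd (congrArg Prod.fst he) (by simp)
  · rw [if_neg hdu, if_pos hdv, toLex_inj] at he
    exact absurd (congrArg Prod.fst he) (by simp)
  · rw [if_neg hdu, if_neg hdv, toLex_inj] at he
    have he2 := congrArg Prod.snd he
    rw [toLex_inj] at he2
    exact Sum.inr.injEq _ _ ▸ he2

-- ===== VERDICT (by name: the statement is the Claim_ definition above) =====
theorem obtener_urs_disponibles_cp_spec : Claim_equal_obtener_urs_disponibles_cp := by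
  intro datos_cp _hdom hpre
  unfold Spec_obtener_urs_disponibles_cp obtener_urs_disponibles_cp obtener_urs_disponibles_cp_alt
  simp only [pvUrs_eq]
  set U : List String := PySem.Set.ofList (pvSufs datos_cp) with hU
  have hUnd : U.Nodup := PySem.Set.nodup_ofList _
  have hUsub : ∀ a, a ∈ U ↔ a ∈ pvSufs datos_cp := fun a => PySem.Set.mem_ofList _ _
  have hinjS := pvKeyB_inj datos_cp hpre
  have hinjU : ∀ u ∈ U, ∀ v ∈ U, PySem.Str.strIsdigit u = true → PySem.Str.strIsdigit v = true →
      pvNumKey u = pvNumKey v → u = v := by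
    intro u hu v hv hdu hdv hk
    refine hinjS u v ((hUsub u).mp hu) ((hUsub v).mp hv) ?_
    have hdu' : PySem.Chars.strIsdigit u.toList = true := by simpa using hdu
    have hdv' : PySem.Chars.strIsdigit v.toList = true := by simpa using hdv
    simp [pvKeyB, hdu', hdv', hk]
  have hB := pvFold_spec datos_cp []
    (by
      intro u v hu hv
      simp only [List.mem_nil_iff, false_or] at hu hv
      exact hinjS u v hu hv)
    List.nodup_nil List.Pairwise.nil
  have hAmem := pvA_mem U
  have hAnd := pvA_nodup U hUnd
  have hApw := pvA_pairwise U hUnd hinjU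
  have hperm : (PySem.List.sorted (U.filter (fun ur => PySem.Str.strIsdigit ur)) (fun x => pvNumKey x)
      ++ PySem.List.sorted (U.filter (fun ur => !PySem.Str.strIsdigit ur)) (fun x => x)).Perm
      (datos_cp.foldl
        (fun res kv =>
          if 5 < PySem.Str.len kv.1 then
            let ur := pvSuffix kv.1
            if ur ∈ res then res else pvInsertAt res ur
          else res) []) := by
    rw [List.perm_ext_iff_of_nodup hAnd hB.2.1]
    intro a
    rw [hAmem a, hB.1 a, hUsub a]
    simp
  exact List.Perm.eq_of_pairwise
    (fun a b _ _ h1 h2 => absurd h2 (lt_asymm h1)) hApw hB.2.2 hperm
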